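-- pv_equiv track=rewrite | github.com/Q-Mart/adventofcode | 2017/day3.py | spiralRing
-- ===== SOURCE A (Python) =====
-- def spiralRing(ringNo):
--     highestVal = (ringNo)**2
--     lowestVal = ((ringNo-2)**2) + 1
--
--     locations = {}
--
--     half = (ringNo-1) // 2
--     possibleCoOrds = range(-half, half+1)
--     size = len(possibleCoOrds)
--
--     currentXIndex = size-1
--     currentYIndex = 0
--     direction = 'U'
--     for i in range(highestVal, lowestVal, -1):
--         locations[i] = (possibleCoOrds[currentXIndex], possibleCoOrds[currentYIndex])
--
--         if currentYIndex == size-1 and currentXIndex == size-1: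
--             direction = 'L'
--         elif currentYIndex == size-1 and currentXIndex == 0:
--             direction = 'D'
--         elif currentYIndex == 0 and currentXIndex == 0:
--             direction = 'R'
--
--         if direction == 'U': currentYIndex += 1
--         elif direction == 'L': currentXIndex -= 1
--         elif direction == 'D': currentYIndex -= 1
--         elif direction == 'R': currentXIndex += 1
--     return locations
-- ===== SOURCE B (Python) =====
-- def spiralRing(ringNo):
--     half = (ringNo - 1) // 2
--     coords = ([(half, y) for y in range(-half, half + 1)] +
--               [(x, half) for x in range(half - 1, -half - 1, -1)] +
--               [(-half, y) for y in range(half - 1, -half - 1, -1)] +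
--               [(x, -half) for x in range(-half + 1, half)])
--     return dict(zip(range(ringNo ** 2, (ringNo - 2) ** 2 + 1, -1), coords))
-- ===== Notes on version B (the rewrite author's own statement) =====
-- stated objective: simpler
-- what changed: Replaces the direction state-machine loop (mutable x/y indices plus a 'U/L/D/R' flag updated by corner tests on every iteration) by building the ring's perimeter path directly as four explicit straight edges and zipping it with the descending value range; the zip truncation reproduces A's dropped final cell. Pre_ only excludes even ringNo >= 2, on which A raises IndexError.
-- outside the precondition, e.g. on spiralRing(2): A raises IndexError, B returns {4: (0, 0)}
import Mathlib
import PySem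

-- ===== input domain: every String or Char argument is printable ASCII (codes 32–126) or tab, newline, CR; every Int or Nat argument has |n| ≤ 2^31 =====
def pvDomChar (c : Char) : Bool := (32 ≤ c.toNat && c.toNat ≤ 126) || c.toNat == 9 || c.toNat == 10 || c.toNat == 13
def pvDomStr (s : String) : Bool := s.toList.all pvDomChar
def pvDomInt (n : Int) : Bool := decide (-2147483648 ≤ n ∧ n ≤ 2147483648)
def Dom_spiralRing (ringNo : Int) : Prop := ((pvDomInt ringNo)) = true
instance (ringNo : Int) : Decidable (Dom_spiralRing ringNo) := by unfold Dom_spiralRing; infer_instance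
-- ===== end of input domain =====

-- B replaces A's direction state-machine by building the ring perimeter as four explicit
-- straight edges and zipping them with the descending value range (objective: simpler).

-- ===== PORT A =====
-- the state update of one loop iteration: direction is recomputed from the corner
-- tests, then the indices move (mirrors A's if-chain order exactly)
def spiralNext (size xi yi : Int) (dir : String) : Int × Int × String :=
  let dir := if yi = size - 1 ∧ xi = size - 1 then "L"
             else if yi = size - 1 ∧ xi = 0 then "D"
             else if yi = 0 ∧ xi = 0 then "R"
             else dir
  if dir = "U" then (xi, yi + 1, dir)
  else if dir = "L" then (xi - 1, yi, dir)
  else if dir = "D" then (xi, yi - 1, dir)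
  else if dir = "R" then (xi + 1, yi, dir)
  else (xi, yi, dir)

-- the 'for i in range(highestVal, lowestVal, -1)' loop; none = IndexError
def spiralLoop (coords : List Int) (size : Int) :
    List Int → PySem.Dict Int (Int × Int) × Int × Int × String →
    Option (PySem.Dict Int (Int × Int) × Int × Int × String)
  | [], st => some st
  | i :: rest, (loc, xi, yi, dir) =>
    match PySem.List.pyGet? coords xi, PySem.List.pyGet? coords yi with
    | some x, some y => spiralLoop coords size rest (loc.insert i (x, y), spiralNext size xi yi dir)
    | _, _ => none

def spiralRing (ringNo : Int) : List (Int × Int × Int) :=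
  let highestVal := ringNo ^ 2
  let lowestVal := (ringNo - 2) ^ 2 + 1
  let half := PySem.Int.floordiv (ringNo - 1) 2
  let possibleCoOrds := PySem.List.pyRange (-half) (half + 1) 1
  let size : Int := PySem.List.len possibleCoOrds
  match spiralLoop possibleCoOrds size (PySem.List.pyRange highestVal lowestVal (-1))
      (PySem.Dict.empty, size - 1, 0, "U") with
  | some (loc, _, _, _) => loc.items
  | none => []  -- IndexError (excluded by Pre_spiralRing)

-- ===== PORT B =====
def spiralRing_alt (ringNo : Int) : List (Int × Int × Int) :=
  let half := PySem.Int.floordiv (ringNo - 1) 2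
  let coords : List (Int × Int) :=
    (PySem.List.pyRange (-half) (half + 1) 1).map (fun y => (half, y)) ++
    (PySem.List.pyRange (half - 1) (-half - 1) (-1)).map (fun x => (x, half)) ++
    (PySem.List.pyRange (half - 1) (-half - 1) (-1)).map (fun y => (-half, y)) ++
    (PySem.List.pyRange (-half + 1) half 1).map (fun x => (x, -half))
  -- dict(zip(ks, coords)): ks is strictly descending, so the dict's items list is the zip itself
  (PySem.List.pyRange (ringNo ^ 2) ((ringNo - 2) ^ 2 + 1) (-1)).zip coords

-- ===== PRECONDITION & SPEC =====
-- Pre_ excludes exactly the even ringNo ≥ 2, on which A raises IndexError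
-- (the index walks off possibleCoOrds); everywhere else A returns normally.
def Pre_spiralRing (ringNo : Int) : Prop := ringNo ≤ 1 ∨ ringNo % 2 = 1
instance (ringNo : Int) : Decidable (Pre_spiralRing ringNo) := by unfold Pre_spiralRing; infer_instance
def pvWitness_spiralRing : Int := 5

def Spec_spiralRing (ringNo : Int) (out : List (Int × Int × Int)) : Prop := out = spiralRing_alt ringNo
instance (ringNo : Int) (out : List (Int × Int × Int)) : Decidable (Spec_spiralRing ringNo out) := by unfold Spec_spiralRing; infer_instance

-- ===== CLAIM (what is proved, stated in full; the proofs are below) =====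
def Claim_equal_spiralRing : Prop := ∀ (ringNo : Int), Dom_spiralRing ringNo → Pre_spiralRing ringNo → Spec_spiralRing ringNo (spiralRing ringNo)

-- ===== LEMMAS AND PROOFS =====

def posSeq (size : Int) : Nat → Int × Int × String → List (Int × Int)
  | 0, _ => []
  | m + 1, (xi, yi, dir) => (xi, yi) :: posSeq size m (spiralNext size xi yi dir)

theorem zip_append_right {α β : Type} (l1 : List α) :
    ∀ (l2 t : List β), l1.length = l2.length → l1.zip (l2 ++ t) = l1.zip l2 := by
  induction l1 with
  | nil => simp
  | cons a l ih =>
    intro l2 t h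
    cases l2 with
    | nil => simp at h
    | cons b l2 => simp_all [List.zip_cons_cons]

theorem range_map_cast_succ {α : Type} (f : Int → α) (k : Nat) :
    (List.range (k + 1)).map (fun t : Nat => f (t : Int)) =
      f 0 :: (List.range k).map (fun t : Nat => f ((t : Int) + 1)) := by
  rw [List.range_succ_eq_map, List.map_cons, List.map_map]
  norm_num

theorem posSeq_succ (n : Int) (m : Nat) (xi yi : Int) (dir : String) :
    posSeq n (m + 1) (xi, yi, dir) = (xi, yi) :: posSeq n m (spiralNext n xi yi dir) := rfl

theorem posSeq_up (n : Int) (hn : 3 ≤ n) :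
    ∀ (k m : Nat) (j : Int), 0 ≤ j → j + k = n - 1 →
    posSeq n (k + 1 + m) (n - 1, j, "U") =
      (List.range (k + 1)).map (fun t : Nat => ((n - 1 : Int), j + (t : Int))) ++
      posSeq n m (n - 2, n - 1, "L") := by
  intro k
  induction k with
  | zero =>
    intro m j _ hj
    have hj' : j = n - 1 := by omega
    subst hj'
    have h1 : 0 + 1 + m = m + 1 := by omega
    have hnext : spiralNext n (n - 1) (n - 1) "U" = (n - 2, n - 1, "L") := by
      simp [spiralNext]
      omega
    rw [h1, posSeq_succ, hnext]
    simp
  | succ k ih =>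
    intro m j hj0 hj
    have h1 : k + 1 + 1 + m = (k + 1 + m) + 1 := by omega
    have hnext : spiralNext n (n - 1) j "U" = (n - 1, j + 1, "U") := by
      have hne1 : ¬(j = n - 1) := by omega
      have hne2 : ¬(n - 1 = 0) := by omega
      simp [spiralNext, hne1, hne2]
    rw [h1, posSeq_succ, hnext, ih m (j + 1) (by omega) (by omega),
        range_map_cast_succ (fun y => ((n - 1 : Int), j + y)) (k + 1)]
    simp only [add_zero, List.cons_append]
    congr 2
    apply List.map_congr_left
    intro t _
    simp only [Prod.mk.injEq, true_and]
    omega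

theorem posSeq_left (n : Int) (hn : 3 ≤ n) :
    ∀ (k m : Nat) (x : Int), x = (k : Int) → x ≤ n - 2 →
    posSeq n (k + 1 + m) (x, n - 1, "L") =
      (List.range (k + 1)).map (fun t : Nat => (x - (t : Int), (n - 1 : Int))) ++
      posSeq n m (0, n - 2, "D") := by
  intro k
  induction k with
  | zero =>
    intro m x hx _
    have hx' : x = 0 := by omega
    subst hx'
    have h1 : 0 + 1 + m = m + 1 := by omega
    have hnext : spiralNext n 0 (n - 1) "L" = (0, n - 2, "D") := by
      have hne : ¬((0 : Int) = n - 1) := by omega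
      simp [spiralNext, hne]
      try omega
    rw [h1, posSeq_succ, hnext]
    simp
  | succ k ih =>
    intro m x hx hx2
    have h1 : k + 1 + 1 + m = (k + 1 + m) + 1 := by omega
    have hnext : spiralNext n x (n - 1) "L" = (x - 1, n - 1, "L") := by
      have hne1 : ¬(x = n - 1) := by omega
      have hne2 : ¬(x = 0) := by omega
      have hne3 : ¬(n - 1 = 0) := by omega
      simp [spiralNext, hne1, hne2, hne3]
    rw [h1, posSeq_succ, hnext, ih m (x - 1) (by omega) (by omega),
        range_map_cast_succ (fun y => (x - y, (n - 1 : Int))) (k + 1)]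
    simp only [sub_zero, List.cons_append]
    congr 2
    apply List.map_congr_left
    intro t _
    simp only [Prod.mk.injEq, and_true]
    omega

theorem posSeq_down (n : Int) (hn : 3 ≤ n) :
    ∀ (k m : Nat) (y : Int), y = (k : Int) → y ≤ n - 2 →
    posSeq n (k + 1 + m) (0, y, "D") =
      (List.range (k + 1)).map (fun t : Nat => ((0 : Int), y - (t : Int))) ++
      posSeq n m (1, 0, "R") := by
  intro k
  induction k with
  | zero =>
    intro m y hy _
    have hy' : y = 0 := by omega
    subst hy'
    have h1 : 0 + 1 + m = m + 1 := by omega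
    have hnext : spiralNext n 0 0 "D" = (1, 0, "R") := by
      have hne : ¬((0 : Int) = n - 1) := by omega
      simp [spiralNext, hne]
      try omega
    rw [h1, posSeq_succ, hnext]
    simp
  | succ k ih =>
    intro m y hy hy2
    have h1 : k + 1 + 1 + m = (k + 1 + m) + 1 := by omega
    have hnext : spiralNext n 0 y "D" = (0, y - 1, "D") := by
      have hne1 : ¬(y = n - 1) := by omega
      have hne2 : ¬(y = 0) := by omega
      have hne3 : ¬((0 : Int) = n - 1) := by omega
      simp [spiralNext, hne1, hne2, hne3]
    rw [h1, posSeq_succ, hnext, ih m (y - 1) (by omega) (by omega),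
        range_map_cast_succ (fun z => ((0 : Int), y - z)) (k + 1)]
    simp only [sub_zero, List.cons_append]
    congr 2
    apply List.map_congr_left
    intro t _
    simp only [Prod.mk.injEq, true_and]
    omega

theorem posSeq_right (n : Int) (hn : 3 ≤ n) :
    ∀ (k : Nat) (x : Int), 1 ≤ x → x + k ≤ n - 1 →
    posSeq n k (x, 0, "R") = (List.range k).map (fun t : Nat => (x + (t : Int), (0 : Int))) := by
  intro k
  induction k with
  | zero => intro x _ _; simp [posSeq]
  | succ k ih =>
    intro x hx1 hx2
    have hnext : spiralNext n x 0 "R" = (x + 1, 0, "R") := by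
      have hne1 : ¬((0 : Int) = n - 1) := by omega
      have hne2 : ¬(x = 0) := by omega
      simp [spiralNext, hne1, hne2]
    rw [posSeq_succ, hnext, ih (x + 1) (by omega) (by omega),
        range_map_cast_succ (fun y => (x + y, (0 : Int))) k]
    simp only [add_zero]
    congr 1
    apply List.map_congr_left
    intro t _
    simp only [Prod.mk.injEq, and_true]
    omega

theorem spiralLoop_items (coords : List Int) (size : Int) :
    ∀ (ks : List Int) (loc : PySem.Dict Int (Int × Int)) (xi yi : Int) (dir : String),
    (∀ p ∈ posSeq size ks.length (xi, yi, dir),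
        0 ≤ p.1 ∧ p.1 < coords.length ∧ 0 ≤ p.2 ∧ p.2 < coords.length) →
    (∀ k ∈ ks, loc.contains k = false) → ks.Nodup →
    ∃ st', spiralLoop coords size ks (loc, xi, yi, dir) = some st' ∧
      st'.1.items = loc.items ++ ks.zip ((posSeq size ks.length (xi, yi, dir)).map
        (fun p => (PySem.List.pyGetD coords p.1 0, PySem.List.pyGetD coords p.2 0))) := by
  intro ks
  induction ks with
  | nil => intro loc xi yi dir _ _ _; exact ⟨(loc, xi, yi, dir), rfl, by simp [posSeq]⟩
  | cons i rest ih =>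
    intro loc xi yi dir hin hfresh hnd
    have hhead : 0 ≤ xi ∧ xi < (coords.length : Int) ∧ 0 ≤ yi ∧ yi < (coords.length : Int) :=
      hin (xi, yi) (by simp [List.length_cons, posSeq])
    obtain ⟨h1, h2, h3, h4⟩ := hhead
    have hx : PySem.List.pyGet? coords xi = some (PySem.List.pyGetD coords xi 0) := by
      rw [PySem.List.pyGet?_eq_some_getElem coords h1 h2,
          PySem.List.pyGetD_eq_getElem coords 0 h1 h2]
    have hy : PySem.List.pyGet? coords yi = some (PySem.List.pyGetD coords yi 0) := by
      rw [PySem.List.pyGet?_eq_some_getElem coords h3 h4,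
          PySem.List.pyGetD_eq_getElem coords 0 h3 h4]
    have hstep : spiralLoop coords size (i :: rest) (loc, xi, yi, dir)
        = spiralLoop coords size rest
            (loc.insert i (PySem.List.pyGetD coords xi 0, PySem.List.pyGetD coords yi 0),
             spiralNext size xi yi dir) := by
      simp [spiralLoop, hx, hy]
    rcases hs : spiralNext size xi yi dir with ⟨xi', yi', dir'⟩
    have hfresh' : ∀ k ∈ rest, (loc.insert i (PySem.List.pyGetD coords xi 0, PySem.List.pyGetD coords yi 0)).contains k = false := by
      intro k hk
      rw [PySem.Dict.contains_insert]
      have hki : k ≠ i := by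
        intro h; subst h; exact (List.nodup_cons.mp hnd).1 hk
      simp [hki, hfresh k (List.mem_cons_of_mem _ hk)]
    have hin' : ∀ p ∈ posSeq size rest.length (xi', yi', dir'),
        0 ≤ p.1 ∧ p.1 < (coords.length : Int) ∧ 0 ≤ p.2 ∧ p.2 < (coords.length : Int) := by
      intro p hp
      apply hin
      show p ∈ posSeq size (rest.length + 1) (xi, yi, dir)
      rw [show posSeq size (rest.length + 1) (xi, yi, dir)
            = (xi, yi) :: posSeq size rest.length (spiralNext size xi yi dir) from rfl, hs]
      exact List.mem_cons_of_mem _ hp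
    obtain ⟨st', hrun, hitems⟩ := ih _ xi' yi' dir' hin' hfresh' (List.nodup_cons.mp hnd).2
    refine ⟨st', ?_, ?_⟩
    · rw [hstep, hs]; exact hrun
    · rw [hitems,
          PySem.Dict.items_insert_of_not_contains (h := hfresh i (List.mem_cons_self))]
      rw [show posSeq size (i :: rest).length (xi, yi, dir)
            = (xi, yi) :: posSeq size rest.length (spiralNext size xi yi dir) from rfl, hs]
      simp [List.zip_cons_cons]

-- ===== VERDICT (by name: the statement is the Claim_ definition above) =====
set_option maxRecDepth 8192 in
theorem spiralRing_spec : Claim_equal_spiralRing := by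
  intro ringNo _ hpre
  unfold Spec_spiralRing
  by_cases hle : ringNo ≤ 1
  · have hk : PySem.List.pyRange (ringNo ^ 2) ((ringNo - 2) ^ 2 + 1) (-1) = [] := by
      have h5 : ringNo ^ 2 - ((ringNo - 2) ^ 2 + 1) = 4 * ringNo - 5 := by ring
      rw [PySem.List.pyRange_neg_one, h5, show (4 * ringNo - 5).toNat = 0 by omega]
      simp
    simp [spiralRing, spiralRing_alt, hk, spiralLoop]
    rfl
  · obtain ⟨H, hH1, hHe⟩ : ∃ H : Nat, 1 ≤ H ∧ ringNo = 2 * (H : Int) + 1 := by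
      rcases hpre with h | h
      · omega
      · exact ⟨((ringNo - 1) / 2).toNat, by omega, by omega⟩
    subst hHe
    have hhalf : PySem.Int.floordiv (2 * (H : Int) + 1 - 1) 2 = (H : Int) := by
      rw [PySem.Int.floordiv_eq_ediv_of_pos (by norm_num)]
      omega
    set coords : List Int := PySem.List.pyRange (-(H : Int)) ((H : Int) + 1) 1 with hcoords
    set keys : List Int :=
      PySem.List.pyRange ((2 * (H : Int) + 1) ^ 2) (((2 * (H : Int) + 1) - 2) ^ 2 + 1) (-1) with hkeys
    have hlen : coords.length = 2 * H + 1 := by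
      rw [hcoords, PySem.List.length_pyRange_one]
      omega
    have hszn : (PySem.List.len coords : Int) = 2 * (H : Int) + 1 := by
      rw [PySem.List.len_eq, hlen]
      push_cast
      ring
    have hkeyslen : keys.length = 8 * H - 1 := by
      have hid : (2 * (H : Int) + 1) ^ 2 - (((2 * (H : Int) + 1) - 2) ^ 2 + 1)
          = 8 * (H : Int) - 1 := by ring
      rw [hkeys, PySem.List.length_pyRange_neg_one, hid]
      omega
    have hn3 : (3 : Int) ≤ 2 * (H : Int) + 1 := by omega
    have e1 : 8 * H - 1 = 2 * H + 1 + (6 * H - 2) := by omega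
    have e2 : 6 * H - 2 = (2 * H - 1) + 1 + (4 * H - 2) := by omega
    have e3 : 4 * H - 2 = (2 * H - 1) + 1 + (2 * H - 2) := by omega
    have bigEq : posSeq (2 * (H : Int) + 1) (8 * H - 1) ((2 * (H : Int) + 1) - 1, 0, "U")
        = ((List.range (2 * H + 1)).map (fun t : Nat => ((2 * (H : Int) + 1) - 1, 0 + (t : Int)))
          ++ ((List.range (2 * H - 1 + 1)).map (fun t : Nat => ((2 * (H : Int) + 1) - 2 - (t : Int), (2 * (H : Int) + 1) - 1))
          ++ ((List.range (2 * H - 1 + 1)).map (fun t : Nat => ((0 : Int), (2 * (H : Int) + 1) - 2 - (t : Int)))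
          ++ (List.range (2 * H - 2)).map (fun t : Nat => (1 + (t : Int), (0 : Int)))))) := by
      rw [e1, posSeq_up _ hn3 (2 * H) (6 * H - 2) 0 le_rfl (by push_cast; ring)]
      rw [e2, posSeq_left _ hn3 (2 * H - 1) (4 * H - 2) ((2 * (H : Int) + 1) - 2)
            (by omega) (by omega)]
      rw [e3, posSeq_down _ hn3 (2 * H - 1) (2 * H - 2) ((2 * (H : Int) + 1) - 2)
            (by omega) (by omega)]
      rw [posSeq_right _ hn3 (2 * H - 2) 1 le_rfl (by omega)]
    have hrw : PySem.List.len coords = 2 * (H : Int) + 1 := by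
      rw [PySem.List.len_eq, hlen]; push_cast; ring
    have hcl : (coords.length : Int) = 2 * (H : Int) + 1 := by
      rw [hlen]; push_cast; ring
    have hin : ∀ p ∈ posSeq (PySem.List.len coords) keys.length
        (PySem.List.len coords - 1, 0, "U"),
        0 ≤ p.1 ∧ p.1 < (coords.length : Int) ∧ 0 ≤ p.2 ∧ p.2 < (coords.length : Int) := by
      rw [hrw, hkeyslen, bigEq]
      intro p hp
      simp only [List.mem_append, List.mem_map, List.mem_range] at hp
      rcases hp with ⟨t, ht, rfl⟩ | ⟨t, ht, rfl⟩ | ⟨t, ht, rfl⟩ | ⟨t, ht, rfl⟩ <;>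
        (rw [hcl]; refine ⟨?_, ?_, ?_, ?_⟩ <;> simp <;> omega)
    have hnodup : keys.Nodup := by
      rw [hkeys, PySem.List.pyRange_neg_one]
      refine List.Nodup.map ?_ List.nodup_range
      intro x y hxy
      simp at hxy
      omega
    obtain ⟨st', hrun, hitems⟩ :=
      spiralLoop_items coords (PySem.List.len coords) keys PySem.Dict.empty
        (PySem.List.len coords - 1) 0 "U" hin (by intro k _; rfl) hnodup
    rcases st' with ⟨loc', A1, A2, A3⟩
    have hA : spiralRing (2 * (H : Int) + 1) = loc'.items := by
      simp only [spiralRing, hhalf]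
      rw [← hcoords, ← hkeys, hrun]
    rw [hA, hitems]
    rw [hrw, hkeyslen, bigEq]
    simp only [show (PySem.Dict.empty : PySem.Dict Int (Int × Int)).items = [] from rfl,
      List.nil_append, List.map_append, List.map_map]
    have hlook : ∀ v : Int, 0 ≤ v → v < 2 * (H : Int) + 1 →
        PySem.List.pyGetD coords v 0 = -(H : Int) + v := by
      intro v h0 h1
      rw [PySem.List.pyGetD_eq_getElem coords 0 h0 (by rw [hlen]; push_cast; omega)]
      simp only [hcoords, PySem.List.getElem_pyRange_one]
      omega
    have hC1 : List.map ((fun p : Int × Int => (PySem.List.pyGetD coords p.1 0, PySem.List.pyGetD coords p.2 0)) ∘ fun t : Nat => ((2 * (H : Int) + 1 - 1 : Int), 0 + (t : Int))) (List.range (2 * H + 1))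
        = List.map (fun t : Nat => ((H : Int), -(H : Int) + (t : Int))) (List.range (2 * H + 1)) := by
      apply List.map_congr_left
      intro t ht
      simp only [List.mem_range] at ht
      simp only [Function.comp_apply]
      rw [hlook _ (by omega) (by omega), hlook _ (by omega) (by omega)]
      simp only [Prod.mk.injEq]
      constructor <;> omega
    have hC2 : List.map ((fun p : Int × Int => (PySem.List.pyGetD coords p.1 0, PySem.List.pyGetD coords p.2 0)) ∘ fun t : Nat => ((2 * (H : Int) + 1 - 2 - (t : Int) : Int), (2 * (H : Int) + 1 - 1 : Int))) (List.range (2 * H - 1 + 1))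
        = List.map (fun t : Nat => ((H : Int) - 1 - (t : Int), (H : Int))) (List.range (2 * H - 1 + 1)) := by
      apply List.map_congr_left
      intro t ht
      simp only [List.mem_range] at ht
      simp only [Function.comp_apply]
      rw [hlook _ (by omega) (by omega), hlook _ (by omega) (by omega)]
      simp only [Prod.mk.injEq]
      constructor <;> omega
    have hC3 : List.map ((fun p : Int × Int => (PySem.List.pyGetD coords p.1 0, PySem.List.pyGetD coords p.2 0)) ∘ fun t : Nat => ((0 : Int), (2 * (H : Int) + 1 - 2 - (t : Int) : Int))) (List.range (2 * H - 1 + 1))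
        = List.map (fun t : Nat => (-(H : Int), (H : Int) - 1 - (t : Int))) (List.range (2 * H - 1 + 1)) := by
      apply List.map_congr_left
      intro t ht
      simp only [List.mem_range] at ht
      simp only [Function.comp_apply]
      rw [hlook _ (by omega) (by omega), hlook _ (by omega) (by omega)]
      simp only [Prod.mk.injEq]
      constructor <;> omega
    have hC4 : List.map ((fun p : Int × Int => (PySem.List.pyGetD coords p.1 0, PySem.List.pyGetD coords p.2 0)) ∘ fun t : Nat => ((1 + (t : Int) : Int), (0 : Int))) (List.range (2 * H - 2))
        = List.map (fun t : Nat => (-(H : Int) + 1 + (t : Int), -(H : Int))) (List.range (2 * H - 2)) := by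
      apply List.map_congr_left
      intro t ht
      simp only [List.mem_range] at ht
      simp only [Function.comp_apply]
      rw [hlook _ (by omega) (by omega), hlook _ (by omega) (by omega)]
      simp only [Prod.mk.injEq]
      constructor <;> omega
    rw [hC1, hC2, hC3, hC4]
    have m1 : (((H : Int) + 1) - -(H : Int)).toNat = 2 * H + 1 := by omega
    have m2 : (((H : Int) - 1) - (-(H : Int) - 1)).toNat = 2 * H - 1 + 1 := by omega
    have m4 : ((H : Int) - (-(H : Int) + 1)).toNat = 2 * H - 2 + 1 := by omega
    have hB : spiralRing_alt (2 * (H : Int) + 1)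
        = keys.zip (List.map (fun t : Nat => ((H : Int), -(H : Int) + (t : Int))) (List.range (2 * H + 1))
          ++ (List.map (fun t : Nat => ((H : Int) - 1 - (t : Int), (H : Int))) (List.range (2 * H - 1 + 1))
          ++ (List.map (fun t : Nat => (-(H : Int), (H : Int) - 1 - (t : Int))) (List.range (2 * H - 1 + 1))
          ++ (List.map (fun t : Nat => (-(H : Int) + 1 + (t : Int), -(H : Int))) (List.range (2 * H - 2))
              ++ [(-(H : Int) + 1 + ((2 * H - 2 : Nat) : Int), -(H : Int))])))) := by
      simp only [spiralRing_alt, hhalf]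
      rw [← hkeys]
      refine congrArg (fun l => keys.zip l) ?_
      rw [PySem.List.pyRange_one (-(H : Int)) ((H : Int) + 1), m1,
          PySem.List.pyRange_neg_one ((H : Int) - 1) (-(H : Int) - 1), m2,
          PySem.List.pyRange_one (-(H : Int) + 1) (H : Int), m4,
          show List.range (2 * H - 2 + 1) = List.range (2 * H - 2) ++ [2 * H - 2] from List.range_succ]
      simp only [List.map_map, List.map_append, List.append_assoc]
      rfl
    rw [hB]
    have hassocB : (List.map (fun t : Nat => ((H : Int), -(H : Int) + (t : Int))) (List.range (2 * H + 1))
          ++ (List.map (fun t : Nat => ((H : Int) - 1 - (t : Int), (H : Int))) (List.range (2 * H - 1 + 1))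
          ++ (List.map (fun t : Nat => (-(H : Int), (H : Int) - 1 - (t : Int))) (List.range (2 * H - 1 + 1))
          ++ (List.map (fun t : Nat => (-(H : Int) + 1 + (t : Int), -(H : Int))) (List.range (2 * H - 2))
              ++ [(-(H : Int) + 1 + ((2 * H - 2 : Nat) : Int), -(H : Int))]))))
        = (List.map (fun t : Nat => ((H : Int), -(H : Int) + (t : Int))) (List.range (2 * H + 1))
          ++ (List.map (fun t : Nat => ((H : Int) - 1 - (t : Int), (H : Int))) (List.range (2 * H - 1 + 1))
          ++ (List.map (fun t : Nat => (-(H : Int), (H : Int) - 1 - (t : Int))) (List.range (2 * H - 1 + 1))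
          ++ List.map (fun t : Nat => (-(H : Int) + 1 + (t : Int), -(H : Int))) (List.range (2 * H - 2)))))
          ++ [(-(H : Int) + 1 + ((2 * H - 2 : Nat) : Int), -(H : Int))] := by
      simp [List.append_assoc]
    have hlzip : keys.length = (List.map (fun t : Nat => ((H : Int), -(H : Int) + (t : Int))) (List.range (2 * H + 1))
          ++ (List.map (fun t : Nat => ((H : Int) - 1 - (t : Int), (H : Int))) (List.range (2 * H - 1 + 1))
          ++ (List.map (fun t : Nat => (-(H : Int), (H : Int) - 1 - (t : Int))) (List.range (2 * H - 1 + 1))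
          ++ List.map (fun t : Nat => (-(H : Int) + 1 + (t : Int), -(H : Int))) (List.range (2 * H - 2))))).length := by
      simp only [hkeyslen, List.length_append, List.length_map, List.length_range]
      omega
    rw [hassocB, zip_append_right keys _ _ hlzip]
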